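-- pv_equiv track=rewrite | github.com/lov-daniel/floodgate | main.py | insertSpacings
-- ===== SOURCE A (Python) =====
-- def insertSpacings(message, spaceIndexes, method):
--
--     if method == "encrypt":
--         for spaces in spaceIndexes:
--             message.insert(spaces, "*")
--     if method == "decrypt":
--         for spaces in spaceIndexes:
--             message.insert(spaces, " ")
--
--     return message
-- ===== SOURCE B (Python) =====
-- def insertSpacings(message, spaceIndexes, method):
--     if method == "encrypt":
--         marker = "*"
--     elif method == "decrypt":
--         marker = " "
--     else:
--         return message
--     # spaceIndexes are the markers' positions in the final list: emit the
--     # result in one pass, copying the message between consecutive markers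
--     out = []
--     mi = 0
--     for pos in spaceIndexes:
--         take = pos - len(out)
--         out.extend(message[mi:mi + take])
--         mi += take
--         out.append(marker)
--     out.extend(message[mi:])
--     message[:] = out
--     return message
-- ===== Notes on version B (the rewrite author's own statement) =====
-- stated objective: alternative
-- what changed: B treats the sorted indexes as the markers' final positions and emits the result in one pass (copy a message segment, place a marker), instead of A's repeated in-place list.insert calls that each shift the tail; Pre_ excludes index lists that are unsorted, negative or beyond the insertion point, on which A's clamped sequential-insert placement is an accident of list.insert rather than final positions.
-- outside the precondition, e.g. on insertSpacings(['a', 'b'], [0, 0], 'encrypt'): A returns ['*', '*', 'a', 'b'], B returns ['*', 'a', '*', 'b']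
import Mathlib
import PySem

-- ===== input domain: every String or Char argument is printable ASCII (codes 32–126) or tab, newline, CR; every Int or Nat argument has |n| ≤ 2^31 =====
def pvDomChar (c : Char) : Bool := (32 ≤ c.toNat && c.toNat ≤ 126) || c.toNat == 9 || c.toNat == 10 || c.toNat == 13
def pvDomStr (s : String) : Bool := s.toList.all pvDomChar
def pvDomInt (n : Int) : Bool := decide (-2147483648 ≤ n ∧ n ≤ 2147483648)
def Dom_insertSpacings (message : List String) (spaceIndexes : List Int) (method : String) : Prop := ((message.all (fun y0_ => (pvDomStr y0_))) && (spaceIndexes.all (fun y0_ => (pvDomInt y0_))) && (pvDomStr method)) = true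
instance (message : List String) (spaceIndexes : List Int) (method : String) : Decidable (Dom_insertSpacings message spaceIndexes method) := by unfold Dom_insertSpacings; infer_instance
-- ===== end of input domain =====

-- B builds the result in one pass, reading the sorted in-range indexes as the
-- markers' final positions, instead of A's repeated shifting list.insert calls.
-- Both A and B mutate `message` in place to the returned content; the theorems
-- below are about the return value.

-- ===== PORT A =====
def insertLoop (message : List String) (spaceIndexes : List Int) (c : String) : List String :=
  spaceIndexes.foldl (fun acc i => PySem.List.insert acc i c) message

def insertSpacings (message : List String) (spaceIndexes : List Int) (method : String) : List String :=
  let m1 := if method = "encrypt" then insertLoop message spaceIndexes "*" else message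
  if method = "decrypt" then insertLoop m1 spaceIndexes " " else m1

-- ===== PORT B =====
-- one step of Source B's loop over `spaceIndexes`, state (out, mi)
def mergeStep (message : List String) (marker : String) (st : List String × Int) (pos : Int) : List String × Int :=
  let take := pos - (st.1.length : Int)
  let out := st.1 ++ PySem.List.slice message (some st.2) (some (st.2 + take))
  (out ++ [marker], st.2 + take)

def buildSpaced (message : List String) (spaceIndexes : List Int) (marker : String) : List String :=
  (spaceIndexes.foldl (mergeStep message marker) ([], (0 : Int))).1
    ++ PySem.List.slice message (some (spaceIndexes.foldl (mergeStep message marker) ([], (0 : Int))).2) none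

def insertSpacings_alt (message : List String) (spaceIndexes : List Int) (method : String) : List String :=
  if method = "encrypt" then buildSpaced message spaceIndexes "*"
  else if method = "decrypt" then buildSpaced message spaceIndexes " "
  else message

-- ===== PRECONDITION & SPEC =====
-- okIdx lo cap idxs: the indexes are strictly increasing, at least lo, and each
-- stays within the list as grown so far (idx_j ≤ cap + j)
def okIdx : Int → Int → List Int → Bool
  | _, _, [] => true
  | lo, cap, i :: rest => lo ≤ i && i ≤ cap && okIdx (i + 1) (cap + 1) rest

-- Pre_ excludes index lists that are unsorted, negative or beyond the insertion
-- point: there A's clamped sequential-insert placement is an accident of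
-- list.insert rather than final marker positions.
def Pre_insertSpacings (message : List String) (spaceIndexes : List Int) (method : String) : Prop :=
  (method = "encrypt" ∨ method = "decrypt") → okIdx 0 (message.length : Int) spaceIndexes = true

instance (message : List String) (spaceIndexes : List Int) (method : String) : Decidable (Pre_insertSpacings message spaceIndexes method) := by unfold Pre_insertSpacings; infer_instance

def pvWitness_insertSpacings : List String × List Int × String := (["H", "I"], [1, 3], "encrypt")

def Spec_insertSpacings (message : List String) (spaceIndexes : List Int) (method : String) (out : List String) : Prop := out = insertSpacings_alt message spaceIndexes method
instance (message : List String) (spaceIndexes : List Int) (method : String) (out : List String) : Decidable (Spec_insertSpacings message spaceIndexes method out) := by unfold Spec_insertSpacings; infer_instance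

-- ===== CLAIM (what is proved, stated in full; the proofs are below) =====
def Claim_equal_insertSpacings : Prop := ∀ (message : List String) (spaceIndexes : List Int) (method : String), Dom_insertSpacings message spaceIndexes method → Pre_insertSpacings message spaceIndexes method → Spec_insertSpacings message spaceIndexes method (insertSpacings message spaceIndexes method)

-- ===== LEMMAS AND PROOFS =====

-- common characterisation both loops are reduced to: place a marker at each
-- (relative) index, recursing on the remaining suffix with shifted indexes
def spec : List String → List Int → String → List String
  | msg, [], _ => msg
  | msg, i :: rest, c =>
      msg.take i.toNat ++ c :: spec (msg.drop i.toNat) (rest.map (fun s => s - (i + 1))) c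
  termination_by _ idxs _ => idxs.length
  decreasing_by simp

theorem okIdx_map_sub (t : Int) : ∀ (idxs : List Int) (lo cap : Int), okIdx lo cap idxs = true →
    okIdx (lo - t) (cap - t) (idxs.map (fun s => s - t)) = true := by
  intro idxs
  induction idxs with
  | nil => intro lo cap _; simp [okIdx]
  | cons i rest ih =>
    intro lo cap h
    simp [okIdx] at h ⊢
    obtain ⟨⟨h1, h2⟩, h3⟩ := h
    refine ⟨⟨by omega, by omega⟩, ?_⟩
    have := ih (i + 1) (cap + 1) h3
    have e : i - t + 1 = i + 1 - t := by omega
    have e2 : cap - t + 1 = cap + 1 - t := by omega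
    rw [e, e2]
    exact this

theorem okIdx_mono_lo : ∀ (idxs : List Int) (lo lo' cap : Int), lo' ≤ lo →
    okIdx lo cap idxs = true → okIdx lo' cap idxs = true := by
  intro idxs lo lo' cap hle h
  cases idxs with
  | nil => simp [okIdx]
  | cons i rest =>
    simp [okIdx] at h ⊢
    exact ⟨⟨by omega, h.1.2⟩, h.2⟩

-- A's loop leaves an already-filled prefix alone once every index points past it
theorem insertLoop_append : ∀ (idxs : List Int) (pre suf : List String) (c : String),
    okIdx (pre.length : Int) ((pre.length : Int) + (suf.length : Int)) idxs = true →
    insertLoop (pre ++ suf) idxs c = pre ++ insertLoop suf (idxs.map (fun s => s - (pre.length : Int))) c := by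
  intro idxs
  induction idxs with
  | nil => intro pre suf c _; simp [insertLoop]
  | cons i rest ih =>
    intro pre suf c h
    simp [okIdx] at h
    obtain ⟨⟨h1, h2⟩, h3⟩ := h
    have hins : PySem.List.insert (pre ++ suf) i c = pre ++ PySem.List.insert suf (i - (pre.length : Int)) c := by
      have hi : i = ((i.toNat : Nat) : Int) := by omega
      conv_lhs => rw [hi]
      rw [PySem.List.insert_natCast _ _ _ (by simp; omega)]
      have hi2 : i - (pre.length : Int) = ((i.toNat - pre.length : Nat) : Int) := by omega
      rw [hi2, PySem.List.insert_natCast suf _ c (by omega)]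
      rw [List.take_append, List.drop_append]
      rw [List.take_of_length_le (by omega), List.drop_eq_nil_of_le (by omega)]
      simp
    simp only [insertLoop, List.foldl_cons, List.map_cons] at ih ⊢
    rw [hins]
    have h3' : okIdx (pre.length : Int)
        ((pre.length : Int) + ((PySem.List.insert suf (i - (pre.length : Int)) c).length : Int)) rest = true := by
      rw [PySem.List.length_insert]
      apply okIdx_mono_lo rest (i + 1) _ _ (by omega)
      have e : (pre.length : Int) + ((suf.length + 1 : Nat) : Int) = (pre.length : Int) + (suf.length : Int) + 1 := by push_cast; ring
      rw [e]
      exact h3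
    exact ih pre (PySem.List.insert suf (i - (pre.length : Int)) c) c h3'

theorem A_eq : ∀ (n : Nat) (idxs : List Int), idxs.length = n → ∀ (msg : List String) (c : String),
    okIdx 0 (msg.length : Int) idxs = true → insertLoop msg idxs c = spec msg idxs c := by
  intro n
  induction n with
  | zero =>
    intro idxs hlen msg c _
    have : idxs = [] := List.eq_nil_of_length_eq_zero hlen
    subst this
    simp [insertLoop, spec]
  | succ m ih =>
    intro idxs hlen msg c h
    cases idxs with
    | nil => simp [insertLoop, spec]
    | cons i rest =>
      simp [okIdx] at h
      obtain ⟨⟨h1, h2⟩, h3⟩ := h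
      have hi : i = ((i.toNat : Nat) : Int) := by omega
      have hiL : i.toNat ≤ msg.length := by omega
      have hins : PySem.List.insert msg i c = (msg.take i.toNat ++ [c]) ++ msg.drop i.toNat := by
        conv_lhs => rw [hi]
        rw [PySem.List.insert_natCast _ _ _ hiL]
        simp
      have hprelen : ((msg.take i.toNat ++ [c]).length : Int) = i + 1 := by
        simp [List.length_take]; omega
      have hsuflen : ((msg.drop i.toNat).length : Int) = (msg.length : Int) - i := by
        simp [List.length_drop]; omega
      have hokpre : okIdx (((msg.take i.toNat ++ [c]).length : Int))
          ((((msg.take i.toNat ++ [c]).length) : Int) + (((msg.drop i.toNat).length) : Int)) rest = true := by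
        rw [hprelen, hsuflen]
        have e : i + 1 + ((msg.length : Int) - i) = (msg.length : Int) + 1 := by ring
        rw [e]
        exact h3
      have hshift : insertLoop (PySem.List.insert msg i c) rest c
          = (msg.take i.toNat ++ [c]) ++ insertLoop (msg.drop i.toNat) (rest.map (fun s => s - (i + 1))) c := by
        rw [hins]
        rw [insertLoop_append rest (msg.take i.toNat ++ [c]) (msg.drop i.toNat) c hokpre]
        rw [hprelen]
      have hok' : okIdx 0 ((msg.drop i.toNat).length : Int) (rest.map (fun s => s - (i + 1))) = true := by
        rw [hsuflen]
        have := okIdx_map_sub (i + 1) rest (i + 1) ((msg.length : Int) + 1) h3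
        simpa using this
      have hihr := ih (rest.map (fun s => s - (i + 1))) (by simpa using Nat.succ_injective hlen) (msg.drop i.toNat) c hok'
      have : insertLoop msg (i :: rest) c = insertLoop (PySem.List.insert msg i c) rest c := by
        simp [insertLoop]
      rw [this, hshift, hihr, spec]
      simp

theorem B_eq : ∀ (idxs : List Int) (msg out : List String) (mi d : Nat) (c : String),
    okIdx ((mi : Int) + (d : Int)) ((msg.length : Int) + (d : Int)) idxs = true →
    out.length = mi + d →
    (let st := idxs.foldl (mergeStep msg c) (out, (mi : Int));
     st.1 ++ PySem.List.slice msg (some st.2) none)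
    = out ++ spec (msg.drop mi) (idxs.map (fun s => s - ((mi : Int) + (d : Int)))) c := by
  intro idxs
  induction idxs with
  | nil =>
    intro msg out mi d c _ _
    simp [spec, PySem.List.slice_from_natCast]
  | cons i rest ih =>
    intro msg out mi d c h hout
    simp [okIdx] at h
    obtain ⟨⟨h1, h2⟩, h3⟩ := h
    -- the step
    set t : Nat := (i - ((mi : Int) + (d : Int))).toNat with ht
    have hti : i = ((mi + t + d : Nat) : Int) := by push_cast; omega
    have htL : mi + t ≤ msg.length := by
      have : (i : Int) ≤ (msg.length : Int) + d := h2
      omega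
    have hstep : mergeStep msg c (out, (mi : Int)) i
        = (out ++ (msg.drop mi).take t ++ [c], ((mi + t : Nat) : Int)) := by
      simp only [mergeStep, hout]
      push_cast
      have e1 : i - ((mi : Int) + (d : Int)) = (t : Int) := by omega
      rw [e1, PySem.List.slice_natCast_add]
    have hout' : (out ++ (msg.drop mi).take t ++ [c]).length = (mi + t) + (d + 1) := by
      simp [List.length_take, List.length_drop]
      omega
    have hok' : okIdx (((mi + t : Nat) : Int) + ((d + 1 : Nat) : Int)) ((msg.length : Int) + ((d + 1 : Nat) : Int)) rest = true := by
      have e : ((mi + t : Nat) : Int) + ((d + 1 : Nat) : Int) = i + 1 := by push_cast; omega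
      have e2 : (msg.length : Int) + ((d + 1 : Nat) : Int) = (msg.length : Int) + (d : Int) + 1 := by push_cast; ring
      rw [e, e2]
      exact h3
    have hihr := ih msg (out ++ (msg.drop mi).take t ++ [c]) (mi + t) (d + 1) c hok' hout'
    simp only [List.foldl_cons, hstep]
    simp only at hihr
    rw [hihr]
    -- now identify the right-hand sides
    simp only [List.map_cons]
    rw [spec]
    have efn : ((fun s => s - (((mi + t : Nat) : Int) + ((d + 1 : Nat) : Int))) = fun s : Int => s - ((mi : Int) + (d : Int)) - ((i - ((mi : Int) + (d : Int))) + 1)) := by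
      funext s; push_cast; omega
    have edrop : (msg.drop (mi + t)) = (msg.drop mi).drop (i - ((mi : Int) + (d : Int))).toNat := by
      have e : (i - ((mi : Int) + (d : Int))).toNat = t := rfl
      rw [List.drop_drop, e, Nat.add_comm]
    have etake : (msg.drop mi).take (i - ((mi : Int) + (d : Int))).toNat = (msg.drop mi).take t := rfl
    rw [efn, edrop, etake]
    simp [Function.comp_def]

theorem buildSpaced_eq (msg : List String) (idxs : List Int) (c : String)
    (h : okIdx 0 (msg.length : Int) idxs = true) : buildSpaced msg idxs c = spec msg idxs c := by
  have hb := B_eq idxs msg [] 0 0 c (by simpa using h) (by simp)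
  simp only [Nat.cast_zero, add_zero, sub_zero, List.nil_append, List.drop_zero, List.map_id'] at hb
  unfold buildSpaced
  exact hb

-- ===== VERDICT (by name: the statement is the Claim_ definition above) =====
theorem insertSpacings_spec : Claim_equal_insertSpacings := by
  intro message spaceIndexes method _ hpre
  unfold Spec_insertSpacings insertSpacings insertSpacings_alt
  by_cases h1 : method = "encrypt"
  · subst h1
    have hok := hpre (Or.inl rfl)
    simp [A_eq spaceIndexes.length spaceIndexes rfl message "*" hok, buildSpaced_eq message spaceIndexes "*" hok]
  · by_cases h2 : method = "decrypt"
    · subst h2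
      have hok := hpre (Or.inr rfl)
      simp [A_eq spaceIndexes.length spaceIndexes rfl message " " hok, buildSpaced_eq message spaceIndexes " " hok]
    · simp [h1, h2]
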